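-- pv_equiv track=rewrite | github.com/Maryam99911/projetchatbot | LoadGlobal.py | construire_contextes_consommation_chauffage
-- ===== SOURCE A (Python) =====
-- def construire_contextes_consommation_chauffage(data):
--     contexts = []
--     for entry in data:
--         location = entry.get('location', 'date inconnue')
--         batiment_ile_de_france = entry.get('batiment_ile_de_france', 'inconnu')
--         batiment_bibliotheque_universitaire = entry.get('batiment_bibliotheque_universitaire', 'inconnu')
--         batiment_ibgbi = entry.get('batiment_ibgbi', 'inconnu')
--         batiment_maupertuis = entry.get('batiment_maupertuis', 'inconnu')
--         batiment_premiers_cycles = entry.get('batiment_premiers_cycles', 'inconnu')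
--         batiment_facteur_cheval = entry.get('batiment_facteur_cheval', 'inconnu')
--
--         context = (f"Pour la date {location}, la consommation de chauffage urbain est la suivante :\n"
--                    f"- Batiment Île de France : {batiment_ile_de_france}\n"
--                    f"- Batiment Bibliothèque Universitaire : {batiment_bibliotheque_universitaire}\n"
--                    f"- Batiment IBGBI : {batiment_ibgbi}\n"
--                    f"- Batiment Maupertuis : {batiment_maupertuis}\n"
--                    f"- Batiment Premiers Cycles : {batiment_premiers_cycles}\n"
--                    f"- Batiment Facteur Cheval : {batiment_facteur_cheval}")
--         contexts.append(context)
--     return contexts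
-- ===== SOURCE B (Python) =====
-- CHAMPS_CHAUFFAGE = [
--     ("Batiment Île de France", "batiment_ile_de_france"),
--     ("Batiment Bibliothèque Universitaire", "batiment_bibliotheque_universitaire"),
--     ("Batiment IBGBI", "batiment_ibgbi"),
--     ("Batiment Maupertuis", "batiment_maupertuis"),
--     ("Batiment Premiers Cycles", "batiment_premiers_cycles"),
--     ("Batiment Facteur Cheval", "batiment_facteur_cheval"),
-- ]
--
--
-- def construire_contextes_consommation_chauffage(data):
--     contexts = []
--     for entry in data:
--         lignes = [
--             f"Pour la date {entry.get('location', 'date inconnue')}, "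
--             "la consommation de chauffage urbain est la suivante :"
--         ]
--         for label, key in CHAMPS_CHAUFFAGE:
--             lignes.append(f"- {label} : {entry.get(key, 'inconnu')}")
--         contexts.append("\n".join(lignes))
--     return contexts
-- ===== Notes on version B (the rewrite author's own statement) =====
-- stated objective: idiomatic
-- what changed: Replaces the seven hard-coded variable bindings and one flat multi-line f-string with a table of (label, key) pairs iterated to build the lines, joined with '\n'.
import Mathlib
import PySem

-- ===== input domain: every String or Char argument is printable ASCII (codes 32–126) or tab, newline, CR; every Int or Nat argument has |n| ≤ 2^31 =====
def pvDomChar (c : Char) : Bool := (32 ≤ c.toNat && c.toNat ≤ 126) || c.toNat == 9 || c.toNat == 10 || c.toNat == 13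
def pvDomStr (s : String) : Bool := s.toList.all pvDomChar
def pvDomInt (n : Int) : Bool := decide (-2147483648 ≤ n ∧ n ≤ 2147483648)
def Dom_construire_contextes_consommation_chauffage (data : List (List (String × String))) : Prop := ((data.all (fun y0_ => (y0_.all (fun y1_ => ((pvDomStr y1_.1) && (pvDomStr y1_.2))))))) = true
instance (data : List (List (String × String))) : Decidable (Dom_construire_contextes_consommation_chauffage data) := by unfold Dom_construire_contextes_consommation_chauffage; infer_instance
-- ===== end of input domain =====

-- B is a table-driven rewrite of A (a (label, key) schema iterated to build the lines, joined with "\n")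
-- instead of seven hard-coded bindings interpolated into one flat multi-line string; same output, same cost.

-- ===== PORT A =====
def construire_contextes_consommation_chauffage (data : List (List (String × String))) : List String :=
  data.foldl (fun contexts entry =>
    let d : PySem.Dict String String := PySem.Dict.mk entry
    let location := d.getD "location" "date inconnue"
    let batiment_ile_de_france := d.getD "batiment_ile_de_france" "inconnu"
    let batiment_bibliotheque_universitaire := d.getD "batiment_bibliotheque_universitaire" "inconnu"
    let batiment_ibgbi := d.getD "batiment_ibgbi" "inconnu"
    let batiment_maupertuis := d.getD "batiment_maupertuis" "inconnu"
    let batiment_premiers_cycles := d.getD "batiment_premiers_cycles" "inconnu"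
    let batiment_facteur_cheval := d.getD "batiment_facteur_cheval" "inconnu"
    let context :=
      "Pour la date " ++ location ++ ", la consommation de chauffage urbain est la suivante :\n" ++
      "- Batiment Île de France : " ++ batiment_ile_de_france ++ "\n" ++
      "- Batiment Bibliothèque Universitaire : " ++ batiment_bibliotheque_universitaire ++ "\n" ++
      "- Batiment IBGBI : " ++ batiment_ibgbi ++ "\n" ++
      "- Batiment Maupertuis : " ++ batiment_maupertuis ++ "\n" ++
      "- Batiment Premiers Cycles : " ++ batiment_premiers_cycles ++ "\n" ++
      "- Batiment Facteur Cheval : " ++ batiment_facteur_cheval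
    contexts ++ [context]) []

-- ===== PORT B =====
def chauffageChamps : List (String × String) :=
  [("Batiment Île de France", "batiment_ile_de_france"),
   ("Batiment Bibliothèque Universitaire", "batiment_bibliotheque_universitaire"),
   ("Batiment IBGBI", "batiment_ibgbi"),
   ("Batiment Maupertuis", "batiment_maupertuis"),
   ("Batiment Premiers Cycles", "batiment_premiers_cycles"),
   ("Batiment Facteur Cheval", "batiment_facteur_cheval")]

def construire_contextes_consommation_chauffage_alt (data : List (List (String × String))) : List String :=
  data.foldl (fun contexts entry =>
    let d : PySem.Dict String String := PySem.Dict.mk entry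
    let lignes :=
      ["Pour la date " ++ d.getD "location" "date inconnue" ++
       ", la consommation de chauffage urbain est la suivante :"]
    let lignes := chauffageChamps.foldl
      (fun ls lk => ls ++ ["- " ++ lk.1 ++ " : " ++ d.getD lk.2 "inconnu"]) lignes
    contexts ++ [PySem.Str.join "\n" lignes]) []

-- ===== PRECONDITION & SPEC =====
def Spec_construire_contextes_consommation_chauffage (data : List (List (String × String))) (out : List String) : Prop := out = construire_contextes_consommation_chauffage_alt data
instance (data : List (List (String × String))) (out : List String) : Decidable (Spec_construire_contextes_consommation_chauffage data out) := by unfold Spec_construire_contextes_consommation_chauffage; infer_instance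

-- ===== CLAIM (what is proved, stated in full; the proofs are below) =====
def Claim_equal_construire_contextes_consommation_chauffage : Prop := ∀ (data : List (List (String × String))), Dom_construire_contextes_consommation_chauffage data → Spec_construire_contextes_consommation_chauffage data (construire_contextes_consommation_chauffage data)

-- ===== LEMMAS AND PROOFS =====
-- the two per-entry context strings coincide
set_option maxRecDepth 8192 in
lemma chauffage_entry_eq (entry : List (String × String)) :
    (let d : PySem.Dict String String := PySem.Dict.mk entry
     "Pour la date " ++ d.getD "location" "date inconnue" ++ ", la consommation de chauffage urbain est la suivante :\n" ++
     "- Batiment Île de France : " ++ d.getD "batiment_ile_de_france" "inconnu" ++ "\n" ++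
     "- Batiment Bibliothèque Universitaire : " ++ d.getD "batiment_bibliotheque_universitaire" "inconnu" ++ "\n" ++
     "- Batiment IBGBI : " ++ d.getD "batiment_ibgbi" "inconnu" ++ "\n" ++
     "- Batiment Maupertuis : " ++ d.getD "batiment_maupertuis" "inconnu" ++ "\n" ++
     "- Batiment Premiers Cycles : " ++ d.getD "batiment_premiers_cycles" "inconnu" ++ "\n" ++
     "- Batiment Facteur Cheval : " ++ d.getD "batiment_facteur_cheval" "inconnu") =
    (let d : PySem.Dict String String := PySem.Dict.mk entry
     PySem.Str.join "\n"
       (chauffageChamps.foldl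
         (fun ls lk => ls ++ ["- " ++ lk.1 ++ " : " ++ d.getD lk.2 "inconnu"])
         ["Pour la date " ++ d.getD "location" "date inconnue" ++
          ", la consommation de chauffage urbain est la suivante :"])) := by
  apply String.toList_injective
  simp [chauffageChamps, PySem.Str.join, PySem.Chars.join_cons_cons, PySem.Chars.join_singleton]

-- ===== VERDICT (by name: the statement is the Claim_ definition above) =====
theorem construire_contextes_consommation_chauffage_spec : Claim_equal_construire_contextes_consommation_chauffage := by
  intro data _
  unfold Spec_construire_contextes_consommation_chauffage
  unfold construire_contextes_consommation_chauffage construire_contextes_consommation_chauffage_alt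
  rw [PySem.List.foldl_append_singleton_eq_map, PySem.List.foldl_append_singleton_eq_map]
  simp only [List.nil_append]
  apply List.map_congr_left
  intro entry _
  exact chauffage_entry_eq entry
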